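-- pv_equiv track=rewrite | github.com/shivankj11/Hack112 | fullDataAnalysis.py | commonWord
-- ===== SOURCE A (Python) =====
-- def decipherData(dataDictionary):
--     newDataDictionary={} #the cleaned up dictionary
--     for entry in dataDictionary:
--         stringList=dataDictionary[entry] #gets list of excerpts from category
--         newList=[] #list of cleaned up strings
--         for string in stringList:
--             inArrows=False
--             #checks if the value in the string is part of the html or actual language
--             currString="" #creates cleaned string
--             for char in string:
--                 if char=="<":
--                     inArrows=True
--                 if not inArrows and char!="\n" and char!="\'":
--                     currString+=char
--                 if char==">":
--                     inArrows=False
--             newList.append(currString)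
--         newDataDictionary[entry]=newList
--     return newDataDictionary
--
-- def commonWord(data):
--     wordCount = {}
--     dictionary = decipherData(data)
--     for genre in dictionary:
--         wordCount[genre] = wordCount.get(genre,{})
--         for string in dictionary[genre]:
--             for word in string.split():
--                 word = word.lower()
--                 newWord = ''
--                 for letter in word:
--                     if letter.isalpha():
--                         newWord += letter
--                 word = newWord
--                 if word not in wordCount[genre]:
--                     wordCount[genre][word] = 0
--                 count = wordCount[genre].get(word,0)
--                 wordCount[genre][word] += 1
--     return wordCount
-- ===== SOURCE B (Python) =====
-- def commonWord(data):
--     # Single fused pass: clean (strip <...>, drop '\n' and "'"), tokenize and count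
--     # in one character scan per excerpt, never building cleaned strings.
--     result = {}
--     for genre, excerpts in data.items():
--         counts = {}
--         for s in excerpts:
--             in_arrows = False
--             in_tok = False
--             word = ''
--             for c in s:
--                 if in_arrows:
--                     if c == '>':
--                         in_arrows = False
--                 elif c == '<':
--                     in_arrows = True
--                 elif c == '\n' or c == "'":
--                     pass  # these chars were deleted by cleaning: no boundary, no letter
--                 elif c.isspace():
--                     if in_tok:
--                         counts[word] = counts.get(word, 0) + 1
--                         in_tok = False
--                         word = ''
--                 else:
--                     in_tok = True
--                     if c.isalpha():
--                         word += c.lower()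
--             if in_tok:
--                 counts[word] = counts.get(word, 0) + 1
--         result[genre] = counts
--     return result
-- ===== Notes on version B (the rewrite author's own statement) =====
-- stated objective: alternative
-- what changed: Fuses decipherData's cleaning with splitting, lowercasing, alpha-filtering and counting into a single per-excerpt character scan with an inArrows/in-token state machine, never materializing cleaned strings, split lists or intermediate normalized words.
import Mathlib
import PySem

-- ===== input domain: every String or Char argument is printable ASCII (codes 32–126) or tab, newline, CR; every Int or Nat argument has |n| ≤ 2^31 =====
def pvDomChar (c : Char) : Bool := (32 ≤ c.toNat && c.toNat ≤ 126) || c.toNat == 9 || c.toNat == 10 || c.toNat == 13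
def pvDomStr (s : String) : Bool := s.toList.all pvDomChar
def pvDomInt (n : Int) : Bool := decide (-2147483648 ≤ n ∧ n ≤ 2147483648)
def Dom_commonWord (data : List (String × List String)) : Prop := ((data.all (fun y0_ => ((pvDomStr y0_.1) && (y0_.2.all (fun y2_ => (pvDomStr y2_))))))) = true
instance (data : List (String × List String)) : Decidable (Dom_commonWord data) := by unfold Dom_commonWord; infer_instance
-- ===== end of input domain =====

-- B fuses cleaning, tokenizing, normalizing and counting into one character scan per
-- excerpt (no cleaned strings, no split lists); objective: alternative (same cost).

-- ===== PORT A =====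
-- decipherData's inner character loop (verbatim: the three statements over (inArrows, currString))
def pvCleanStep (st : Bool × List Char) (char : Char) : Bool × List Char :=
  let inArrows : Bool := if char = '<' then true else st.1
  let currString : List Char := if inArrows = false ∧ char ≠ '\n' ∧ char ≠ '\'' then st.2 ++ [char] else st.2
  let inArrows : Bool := if char = '>' then false else inArrows
  (inArrows, currString)

def pvDecipherStr (s : String) : String :=
  String.ofList (s.toList.foldl pvCleanStep (false, [])).2

-- decipherData: builds the cleaned dictionary
def pvDecipherData (data : List (String × List String)) : PySem.Dict String (List String) :=
  data.foldl (fun nd p =>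
    let newList := p.2.foldl (fun nl s => nl ++ [pvDecipherStr s]) []
    nd.insert p.1 newList) PySem.Dict.empty

-- body of `for word in string.split()` in commonWord
def pvAWordBody (genre : String) (wordCount : PySem.Dict String (PySem.Dict String Int)) (word0 : String) :
    PySem.Dict String (PySem.Dict String Int) :=
  let word := PySem.Str.lower word0
  let newWord := word.toList.foldl (fun nw letter => if PySem.Chars.isalpha letter then nw ++ [letter] else nw) ([] : List Char)
  let word := String.ofList newWord
  let g := wordCount.getD genre PySem.Dict.empty
  let g := if g.contains word then g else g.insert word 0
  let count := g.getD word 0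
  wordCount.insert genre (g.insert word (count + 1))

-- body of `for genre in dictionary`
def pvAGenreBody (wordCount : PySem.Dict String (PySem.Dict String Int)) (gp : String × List String) :
    PySem.Dict String (PySem.Dict String Int) :=
  let wordCount := wordCount.insert gp.1 (wordCount.getD gp.1 PySem.Dict.empty)
  gp.2.foldl (fun wc s => (PySem.Str.split₀ s).foldl (pvAWordBody gp.1) wc) wordCount

def commonWord (data : List (String × List String)) : List (String × List (String × Int)) :=
  let dictionary := pvDecipherData data
  let wordCount := dictionary.items.foldl pvAGenreBody PySem.Dict.empty
  wordCount.items.map (fun p => (p.1, p.2.items))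

-- ===== PORT B =====
-- counts[word] = counts.get(word, 0) + 1
def pvBump (d : PySem.Dict String Int) (w : String) : PySem.Dict String Int :=
  d.insert w (d.getD w 0 + 1)

-- state: (in_arrows, in_tok, word, counts)
def pvScanStep (st : Bool × Bool × List Char × PySem.Dict String Int) (c : Char) :
    Bool × Bool × List Char × PySem.Dict String Int :=
  if st.1 then
    (if c = '>' then (false, st.2) else st)
  else if c = '<' then (true, st.2)
  else if c = '\n' ∨ c = '\'' then st
  else if PySem.Chars.isspace c then
    (if st.2.1 then (false, false, [], pvBump st.2.2.2 (String.ofList st.2.2.1)) else st)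
  else
    (false, true, st.2.2.1 ++ (if PySem.Chars.isalpha c then [PySem.Chars.lowerChar c] else []), st.2.2.2)

def pvCountExcerpt (counts : PySem.Dict String Int) (s : String) : PySem.Dict String Int :=
  let st := s.toList.foldl pvScanStep (false, false, [], counts)
  if st.2.1 then pvBump st.2.2.2 (String.ofList st.2.2.1) else st.2.2.2

def commonWord_alt (data : List (String × List String)) : List (String × List (String × Int)) :=
  (data.foldl (fun res p => res.insert p.1 (p.2.foldl pvCountExcerpt PySem.Dict.empty))
    (PySem.Dict.empty : PySem.Dict String (PySem.Dict String Int))).items.map (fun p => (p.1, p.2.items))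

-- ===== PRECONDITION & SPEC =====
def Spec_commonWord (data : List (String × List String)) (out : List (String × List (String × Int))) : Prop := out = commonWord_alt data
instance (data : List (String × List String)) (out : List (String × List (String × Int))) : Decidable (Spec_commonWord data out) := by unfold Spec_commonWord; infer_instance

-- ===== CLAIM (what is proved, stated in full; the proofs are below) =====
def Claim_equal_commonWord : Prop := ∀ (data : List (String × List String)), Dom_commonWord data → Spec_commonWord data (commonWord data)

-- ===== LEMMAS AND PROOFS =====

-- A's cleaning of a character list, starting from arrow state ia
def pvClean : Bool → List Char → List Char
  | _, [] => []
  | ia, c :: cs =>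
      let ia1 : Bool := if c = '<' then true else ia
      let ia2 : Bool := if c = '>' then false else ia1
      (if ia1 = false ∧ c ≠ '\n' ∧ c ≠ '\'' then [c] else []) ++ pvClean ia2 cs

-- normalized form of a raw token
def pvNorm (t : List Char) : List Char := (t.filter PySem.Chars.isalpha).map PySem.Chars.lowerChar

-- the arrow-free tokenizing/counting step (B's scan step with the inArrows logic stripped)
def pvTStep (st : Bool × List Char × PySem.Dict String Int) (c : Char) : Bool × List Char × PySem.Dict String Int :=
  if c = '\n' ∨ c = '\'' then st
  else if PySem.Chars.isspace c then
    (if st.1 then (false, [], pvBump st.2.2 (String.ofList st.2.1)) else st)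
  else (true, st.2.1 ++ (if PySem.Chars.isalpha c then [PySem.Chars.lowerChar c] else []), st.2.2)

def pvFinish (st : Bool × List Char × PySem.Dict String Int) : PySem.Dict String Int :=
  if st.1 then pvBump st.2.2 (String.ofList st.2.1) else st.2.2

-- A's per-word update, as a pure function of the inner dict
def pvWordPure (g : PySem.Dict String Int) (word0 : String) : PySem.Dict String Int :=
  let word := PySem.Str.lower word0
  let newWord := word.toList.foldl (fun nw letter => if PySem.Chars.isalpha letter then nw ++ [letter] else nw) ([] : List Char)
  let word := String.ofList newWord
  let g' := if g.contains word then g else g.insert word 0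
  let count := g'.getD word 0
  g'.insert word (count + 1)

-- per-genre pure value: counts accumulated over a list of (already cleaned) strings
def pvGenreVal (ss : List String) : PySem.Dict String Int :=
  ss.foldl (fun g s => (PySem.Str.split₀ s).foldl pvWordPure g) PySem.Dict.empty

def pvMapVal (f : List String → PySem.Dict String Int) (d : PySem.Dict String (List String)) :
    PySem.Dict String (PySem.Dict String Int) :=
  PySem.Dict.mk (d.items.map (fun q => (q.1, f q.2)))

theorem pv_isalpha_lowerChar (c : Char) : PySem.Chars.isalpha (PySem.Chars.lowerChar c) = PySem.Chars.isalpha c := by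
  simp only [PySem.Chars.isalpha, PySem.Chars.lowerChar]
  by_cases hu : PySem.Chars.isupper c = true
  · have hb := Bool.and_eq_true .. ▸ hu
    have h65 : 65 ≤ c.val.toNat := by simpa [Char.le_def, PySem.Chars.isupper] using hb.1
    have h90 : c.val.toNat ≤ 90 := by simpa [Char.le_def, PySem.Chars.isupper] using hb.2
    have hc : c.toNat = c.val.toNat := rfl
    have hv : (c.toNat + 32).isValidChar := by left; rw [hc]; omega
    have hq : (Char.ofNat (c.toNat + 32)).val.toNat = c.val.toNat + 32 := by
      rw [Char.ofNat, dif_pos hv]; rfl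
    have e1 : ('A' : Char).val.toNat = 65 := rfl
    have e2 : ('Z' : Char).val.toNat = 90 := rfl
    have e3 : ('a' : Char).val.toNat = 97 := rfl
    have e4 : ('z' : Char).val.toNat = 122 := rfl
    rw [if_pos hu, hu]
    rw [Bool.eq_iff_iff]
    simp only [PySem.Chars.isupper, PySem.Chars.islower, Bool.or_eq_true, Bool.and_eq_true,
      decide_eq_true_eq, Char.le_def, UInt32.le_iff_toNat_le, hq, e1, e2, e3, e4]
    constructor
    · intro _; exact Or.inl trivial
    · intro _; exact Or.inr ⟨by omega, by omega⟩
  · simp [hu]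

theorem pv_cleanstep_spec (cs : List Char) : ∀ (ia : Bool) (acc : List Char),
    (cs.foldl pvCleanStep (ia, acc)).2 = acc ++ pvClean ia cs := by
  induction cs with
  | nil => intro ia acc; simp [pvClean]
  | cons c cs ih =>
    intro ia acc
    simp only [List.foldl_cons, pvCleanStep, pvClean, ih]
    split_ifs <;> simp_all

theorem pv_clean_no_nl (cs : List Char) : ∀ ia : Bool, '\n' ∉ pvClean ia cs ∧ '\'' ∉ pvClean ia cs := by
  induction cs with
  | nil => intro ia; simp [pvClean]
  | cons c cs ih =>
    intro ia
    simp only [pvClean, List.mem_append]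
    refine ⟨?_, ?_⟩ <;>
    · rintro (hm | hm)
      · split_ifs at hm <;> simp_all [eq_comm]
      · first
        | exact (ih _).1 hm
        | exact (ih _).2 hm

theorem pv_scanstep_false (st : Bool × List Char × PySem.Dict String Int) (c : Char) (h : ¬ c = '<') :
    pvScanStep (false, st) c = (false, pvTStep st c) := by
  simp only [pvScanStep, pvTStep, h]
  split_ifs <;> simp_all

theorem pv_fuse (cs : List Char) : ∀ (ia : Bool) (st : Bool × List Char × PySem.Dict String Int),
    (cs.foldl pvScanStep (ia, st)).2 = (pvClean ia cs).foldl pvTStep st := by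
  induction cs with
  | nil => intro ia st; simp [pvClean]
  | cons c cs ih =>
    intro ia st
    simp only [List.foldl_cons]
    cases ia with
    | true =>
      by_cases hgt : c = '>'
      · subst hgt; simp [pvScanStep, pvClean, ih]
      · simp [pvScanStep, pvClean, hgt, ih]
    | false =>
      by_cases hlt : c = '<'
      · subst hlt; simp [pvScanStep, pvClean, ih]
      · rw [pv_scanstep_false st c hlt, ih]
        by_cases hnl : c = '\n' ∨ c = '\''
        · rcases hnl with h | h <;> subst h <;> simp [pvClean, pvTStep]
        · push Not at hnl
          simp only [pvClean, if_neg hlt, ite_self]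
          rw [if_pos ⟨trivial, hnl.1, hnl.2⟩]
          simp

theorem pv_go_acc (cs : List Char) : ∀ (cur : List Char) (acc : List (List Char)),
    PySem.Chars.split₀.go cs cur acc = acc.reverse ++ PySem.Chars.split₀.go cs cur [] := by
  induction cs with
  | nil =>
    intro cur acc
    simp only [PySem.Chars.split₀.go]
    split_ifs <;> simp
  | cons c cs ih =>
    intro cur acc
    simp only [PySem.Chars.split₀.go]
    split_ifs with h1 h2
    · exact ih _ _
    · rw [ih [] (cur.reverse :: acc), ih [] [cur.reverse]]
      simp
    · exact ih _ _

theorem pv_tok (cs : List Char) : ∀ (r : List Char) (d : PySem.Dict String Int),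
    '\n' ∉ cs → '\'' ∉ cs →
    pvFinish (cs.foldl pvTStep (!r.isEmpty, pvNorm r.reverse, d)) =
      ((PySem.Chars.split₀.go cs r []).map (fun t => String.ofList (pvNorm t))).foldl pvBump d := by
  induction cs with
  | nil =>
    intro r d _ _
    cases r with
    | nil => simp [PySem.Chars.split₀.go, pvFinish]
    | cons a as => simp [PySem.Chars.split₀.go, pvFinish]
  | cons c cs ih =>
    intro r d hn hq
    have hcn : ¬ c = '\n' := by intro h; exact hn (h ▸ List.mem_cons_self ..)
    have hcq : ¬ c = '\'' := by intro h; exact hq (h ▸ List.mem_cons_self ..)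
    have hn' : '\n' ∉ cs := fun h => hn (List.mem_cons_of_mem _ h)
    have hq' : '\'' ∉ cs := fun h => hq (List.mem_cons_of_mem _ h)
    simp only [List.foldl_cons, PySem.Chars.split₀.go]
    by_cases hsp : PySem.Chars.isspace c = true
    · rw [if_pos hsp]
      cases r with
      | nil =>
        simp only [List.isEmpty_nil]
        have := ih [] d hn' hq'
        simpa [pvTStep, hcn, hcq, hsp, pvNorm] using this
      | cons a as =>
        have h1 : (!(a :: as).isEmpty) = true := by simp
        rw [h1]
        have h2 : pvTStep (true, pvNorm (a :: as).reverse, d) c =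
            (false, [], pvBump d (String.ofList (pvNorm (a :: as).reverse))) := by
          simp [pvTStep, hcn, hcq, hsp]
        rw [h2]
        rw [if_neg (by simp : ¬ (a :: as).isEmpty = true)]
        rw [pv_go_acc cs [] [(a :: as).reverse]]
        have h4 := ih [] (pvBump d (String.ofList (pvNorm (a :: as).reverse))) hn' hq'
        simp only [List.reverse_nil, List.isEmpty_nil, Bool.not_true] at h4
        have h3 : pvNorm ([] : List Char) = [] := rfl
        rw [h3] at h4
        rw [h4]
        simp
    · rw [if_neg hsp]
      have := ih (c :: r) d hn' hq'
      have hnorm : pvNorm (c :: r).reverse =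
          pvNorm r.reverse ++ (if PySem.Chars.isalpha c then [PySem.Chars.lowerChar c] else []) := by
        simp only [List.reverse_cons, pvNorm, List.filter_append, List.map_append]
        split_ifs with h <;> simp [h]
      rw [List.isEmpty_cons] at this
      simp only [Bool.not_false] at this
      rw [hnorm] at this
      rw [← this]
      congr 1
      simp [pvTStep, hcn, hcq, hsp]

theorem pv_wordpure_eq (g : PySem.Dict String Int) (word0 : String) :
    pvWordPure g word0 = pvBump g (String.ofList (pvNorm word0.toList)) := by
  have hnorm : ((PySem.Str.lower word0).toList.foldl
      (fun nw letter => if PySem.Chars.isalpha letter then nw ++ [letter] else nw) ([] : List Char)) =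
      pvNorm word0.toList := by
    have hfc : (PySem.Chars.isalpha ∘ PySem.Chars.lowerChar) = PySem.Chars.isalpha :=
      funext pv_isalpha_lowerChar
    have h1 := PySem.List.foldl_append_if PySem.Chars.isalpha (fun x => x) (PySem.Str.lower word0).toList []
    rw [h1]
    simp only [List.nil_append, PySem.Str.toList_lower, PySem.Chars.lower,
      List.filter_map, hfc, pvNorm]
    simp
  simp only [pvWordPure, hnorm]
  set w := String.ofList (pvNorm word0.toList) with hw
  by_cases hc : g.contains w = true
  · simp only [if_pos hc, pvBump]
  · simp only [if_neg hc, pvBump, PySem.Dict.getD_insert_self, PySem.Dict.insert_insert_self,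
      PySem.Dict.getD_of_not_contains g 0 (Bool.not_eq_true _ ▸ hc)]

theorem pv_count_excerpt (d : PySem.Dict String Int) (s : String) :
    pvCountExcerpt d s = (PySem.Str.split₀ (pvDecipherStr s)).foldl pvWordPure d := by
  have h0 : pvCountExcerpt d s = pvFinish ((s.toList.foldl pvScanStep (false, (false, [], d))).2) := rfl
  rw [h0, pv_fuse]
  have h1 := pv_tok (pvClean false s.toList) [] d (pv_clean_no_nl _ _).1 (pv_clean_no_nl _ _).2
  simp only [List.isEmpty_nil, Bool.not_true, List.reverse_nil] at h1
  have h2 : pvNorm ([] : List Char) = [] := rfl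
  rw [h2] at h1
  rw [h1]
  have h3 : pvDecipherStr s = String.ofList (pvClean false s.toList) := by
    unfold pvDecipherStr
    rw [pv_cleanstep_spec s.toList false []]
    simp
  rw [h3]
  have h4 : PySem.Str.split₀ (String.ofList (pvClean false s.toList)) =
      (PySem.Chars.split₀.go (pvClean false s.toList) [] []).map String.ofList := by
    simp [PySem.Str.split₀, PySem.Chars.split₀]
  rw [h4]
  simp only [List.foldl_map]
  have h5 : (fun (d : PySem.Dict String Int) t => pvWordPure d (String.ofList t)) =
      fun d t => pvBump d (String.ofList (pvNorm t)) := by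
    funext d t
    rw [pv_wordpure_eq]
    simp
  rw [h5]

theorem pv_insert_get_self {ν : Type} (d : PySem.Dict String ν) (k : String) (v : ν)
    (hnd : d.keys.Nodup) (h : d.get? k = some v) : d.insert k v = d := by
  have hc : d.contains k = true := by
    rw [PySem.Dict.contains_eq_isSome_get?, h]; rfl
  apply PySem.Dict.ext
  rw [PySem.Dict.items_insert_of_contains _ _ hc]
  apply List.map_congr_left ?_ |>.trans (List.map_id _)
  intro p hp
  by_cases hpk : p.1 == k
  · have hk : p.1 = k := by simpa using hpk
    have : d.get? p.1 = some p.2 := PySem.Dict.get?_of_mem_items d (by simpa using hp) hnd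
    rw [hk] at this
    rw [this] at h
    cases h
    simp [hpk]
    rw [← hk]
  · simp [hpk]

theorem pv_words_loop (genre : String) (ws : List String) :
    ∀ (wc : PySem.Dict String (PySem.Dict String Int)) (g : PySem.Dict String Int),
    wc.get? genre = some g → wc.keys.Nodup →
    ws.foldl (pvAWordBody genre) wc = wc.insert genre (ws.foldl pvWordPure g) := by
  induction ws with
  | nil =>
    intro wc g h hnd
    simp only [List.foldl_nil]
    exact (pv_insert_get_self wc genre g hnd h).symm
  | cons w ws ih =>
    intro wc g h hnd
    have hb : pvAWordBody genre wc w = wc.insert genre (pvWordPure (wc.getD genre PySem.Dict.empty) w) := rfl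
    have hg : wc.getD genre PySem.Dict.empty = g := PySem.Dict.getD_of_get?_eq_some _ _ h
    simp only [List.foldl_cons, hb, hg]
    rw [ih (wc.insert genre (pvWordPure g w)) (pvWordPure g w)
      (PySem.Dict.get?_insert_self _ _ _) (PySem.Dict.nodup_keys_insert _ _ _ hnd)]
    rw [PySem.Dict.insert_insert_self]

theorem pv_strings_loop (genre : String) (ss : List String) :
    ∀ (wc : PySem.Dict String (PySem.Dict String Int)) (g : PySem.Dict String Int),
    wc.get? genre = some g → wc.keys.Nodup →
    ss.foldl (fun wc s => (PySem.Str.split₀ s).foldl (pvAWordBody genre) wc) wc =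
      wc.insert genre (ss.foldl (fun g s => (PySem.Str.split₀ s).foldl pvWordPure g) g) := by
  induction ss with
  | nil =>
    intro wc g h hnd
    simp only [List.foldl_nil]
    exact (pv_insert_get_self wc genre g hnd h).symm
  | cons s ss ih =>
    intro wc g h hnd
    simp only [List.foldl_cons]
    rw [pv_words_loop genre (PySem.Str.split₀ s) wc g h hnd]
    rw [ih (wc.insert genre ((PySem.Str.split₀ s).foldl pvWordPure g)) _
      (PySem.Dict.get?_insert_self _ _ _) (PySem.Dict.nodup_keys_insert _ _ _ hnd)]
    rw [PySem.Dict.insert_insert_self]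

theorem pv_genre_body (wc : PySem.Dict String (PySem.Dict String Int)) (gp : String × List String)
    (hnd : wc.keys.Nodup) (hfr : wc.contains gp.1 = false) :
    pvAGenreBody wc gp = wc.insert gp.1 (pvGenreVal gp.2) := by
  unfold pvAGenreBody pvGenreVal
  rw [PySem.Dict.getD_of_not_contains wc PySem.Dict.empty hfr]
  rw [pv_strings_loop gp.1 gp.2 (wc.insert gp.1 PySem.Dict.empty) PySem.Dict.empty
    (PySem.Dict.get?_insert_self _ _ _) (PySem.Dict.nodup_keys_insert _ _ _ hnd)]
  rw [PySem.Dict.insert_insert_self]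

theorem pv_outer (l : List (String × List String)) :
    ∀ (wc : PySem.Dict String (PySem.Dict String Int)),
    wc.keys.Nodup → (∀ p ∈ l, wc.contains p.1 = false) → (l.map Prod.fst).Nodup →
    (l.foldl pvAGenreBody wc).items = wc.items ++ l.map (fun p => (p.1, pvGenreVal p.2)) := by
  induction l with
  | nil => intro wc _ _ _; simp
  | cons p l ih =>
    intro wc hnd hfr hkeys
    simp only [List.foldl_cons]
    rw [pv_genre_body wc p hnd (hfr p (List.mem_cons_self ..))]
    have hfr' : ∀ q ∈ l, (wc.insert p.1 (pvGenreVal p.2)).contains q.1 = false := by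
      intro q hq
      rw [PySem.Dict.contains_insert]
      have h1 : (q.1 == p.1) = false := by
        simp only [List.map_cons, List.nodup_cons] at hkeys
        have : q.1 ∈ l.map Prod.fst := List.mem_map_of_mem hq
        simp only [beq_eq_false_iff_ne, ne_eq]
        intro he; exact hkeys.1 (he ▸ this)
      rw [h1, hfr q (List.mem_cons_of_mem _ hq)]
      rfl
    rw [ih (wc.insert p.1 (pvGenreVal p.2)) (PySem.Dict.nodup_keys_insert _ _ _ hnd) hfr'
      (by simp only [List.map_cons, List.nodup_cons] at hkeys; exact hkeys.2)]
    rw [PySem.Dict.items_insert_of_not_contains _ _ (hfr p (List.mem_cons_self ..))]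
    simp

theorem pv_mapval_insert (f : List String → PySem.Dict String Int) (d : PySem.Dict String (List String))
    (k : String) (v : List String) :
    pvMapVal f (d.insert k v) = (pvMapVal f d).insert k (f v) := by
  have hc : (pvMapVal f d).contains k = d.contains k := by
    simp only [pvMapVal, PySem.Dict.contains, List.any_map]
    rfl
  apply PySem.Dict.ext
  by_cases h : d.contains k = true
  · rw [show (pvMapVal f d).insert k (f v) =
        PySem.Dict.mk ((pvMapVal f d).items.map (fun p => if p.1 == k then (k, f v) else p)) by
      simp only [PySem.Dict.insert, hc, h, if_pos trivial]]
    show ((d.insert k v).items.map (fun q => (q.1, f q.2))) = _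
    rw [PySem.Dict.items_insert_of_contains _ _ h]
    simp only [pvMapVal, List.map_map]
    apply List.map_congr_left
    intro p _
    by_cases hp : p.1 = k
    · simp [hp]
    · simp [hp]
  · have h' : d.contains k = false := by simpa using h
    have hc' : (pvMapVal f d).contains k = false := by rw [hc, h']
    show ((d.insert k v).items.map (fun q => (q.1, f q.2))) = _
    rw [PySem.Dict.items_insert_of_not_contains _ _ h',
      PySem.Dict.items_insert_of_not_contains _ _ hc']
    simp [pvMapVal]

theorem pv_mapval_foldl (f : List String → PySem.Dict String Int) (l : List (String × List String))
    (C : List String → List String) :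
    ∀ d : PySem.Dict String (List String),
    pvMapVal f (l.foldl (fun nd p => nd.insert p.1 (C p.2)) d) =
      l.foldl (fun nd p => nd.insert p.1 (f (C p.2))) (pvMapVal f d) := by
  induction l with
  | nil => intro d; simp
  | cons p l ih =>
    intro d
    simp only [List.foldl_cons]
    rw [← pv_mapval_insert, ih]

theorem pv_decipher_eq (data : List (String × List String)) :
    pvDecipherData data = data.foldl (fun nd p => nd.insert p.1 (p.2.map pvDecipherStr)) PySem.Dict.empty := by
  unfold pvDecipherData
  congr 1
  funext nd p
  rw [PySem.List.foldl_append_singleton_eq_map pvDecipherStr p.2 []]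
  simp

-- ===== VERDICT (by name: the statement is the Claim_ definition above) =====
theorem pv_alt_inner (ex : List String) :
    ex.foldl pvCountExcerpt PySem.Dict.empty = pvGenreVal (ex.map pvDecipherStr) := by
  unfold pvGenreVal
  rw [List.foldl_map]
  congr 1
  funext d s
  exact pv_count_excerpt d s

theorem commonWord_spec : Claim_equal_commonWord := by
  unfold Claim_equal_commonWord Spec_commonWord
  intro data _
  have hdec := pv_decipher_eq data
  have hnodup : (pvDecipherData data).keys.Nodup := by
    rw [hdec]
    exact PySem.Dict.nodup_keys_foldl_insert_key data (fun p => p.1)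
      (fun d p => p.2.map pvDecipherStr) PySem.Dict.empty PySem.Dict.nodup_keys_empty
  have hkeys : ((pvDecipherData data).items.map Prod.fst).Nodup := hnodup
  -- A side
  have hA : commonWord data =
      ((pvDecipherData data).items.map (fun p => (p.1, pvGenreVal p.2))).map
        (fun p => (p.1, p.2.items)) := by
    show ((pvDecipherData data).items.foldl pvAGenreBody PySem.Dict.empty).items.map
      (fun p => (p.1, p.2.items)) = _
    rw [pv_outer (pvDecipherData data).items PySem.Dict.empty PySem.Dict.nodup_keys_empty
      (fun p _ => PySem.Dict.contains_empty _) hkeys]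
    rfl
  -- B side
  have hB : commonWord_alt data =
      ((pvDecipherData data).items.map (fun p => (p.1, pvGenreVal p.2))).map
        (fun p => (p.1, p.2.items)) := by
    show (data.foldl (fun res p => res.insert p.1 (p.2.foldl pvCountExcerpt PySem.Dict.empty))
        PySem.Dict.empty).items.map (fun p => (p.1, p.2.items)) = _
    have h1 : (fun (res : PySem.Dict String (PySem.Dict String Int)) (p : String × List String) =>
        res.insert p.1 (p.2.foldl pvCountExcerpt PySem.Dict.empty)) =
        fun res p => res.insert p.1 (pvGenreVal (p.2.map pvDecipherStr)) := by
      funext res p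
      rw [pv_alt_inner]
    rw [h1]
    have h2 := pv_mapval_foldl pvGenreVal data (fun l => l.map pvDecipherStr) PySem.Dict.empty
    have h3 : pvMapVal pvGenreVal PySem.Dict.empty = PySem.Dict.empty := rfl
    rw [h3] at h2
    rw [← h2, ← hdec]
    rfl
  rw [hA, hB]
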